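-- pv_equiv track=rewrite | github.com/MP-30/dsa_march25 | scaler_practice/prime_num2.py | solve
-- ===== SOURCE A (Python) =====
-- def solve(A):
--     count = 0
--     for i in A:
--         if i ==2:
--             count +=1
--         elif i >2:
--             for j in range(2,(i//2)+1):
--                 if i % j == 0:
--                     break
--                 else: count +=1
--     return count
-- ===== SOURCE B (Python) =====
-- def _smallest_divisor(n):
--     j = 2
--     while j * j <= n:
--         if n % j == 0:
--             return j
--         j += 1
--     return None
--
-- def solve(A):
--     count = 0
--     for i in A:
--         if i == 2:
--             count += 1
--         elif i > 2:
--             d = _smallest_divisor(i)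
--             if d is None:
--                 count += i // 2 - 1
--             else:
--                 count += d - 2
--     return count
-- ===== Notes on version B (the rewrite author's own statement) =====
-- stated objective: faster
-- what changed: Instead of scanning all candidate divisors 2..i//2 with a break, B trial-divides only up to sqrt(i) to find the smallest divisor and adds its contribution (d-2, or i//2-1 for primes) in closed form.
import Mathlib
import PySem

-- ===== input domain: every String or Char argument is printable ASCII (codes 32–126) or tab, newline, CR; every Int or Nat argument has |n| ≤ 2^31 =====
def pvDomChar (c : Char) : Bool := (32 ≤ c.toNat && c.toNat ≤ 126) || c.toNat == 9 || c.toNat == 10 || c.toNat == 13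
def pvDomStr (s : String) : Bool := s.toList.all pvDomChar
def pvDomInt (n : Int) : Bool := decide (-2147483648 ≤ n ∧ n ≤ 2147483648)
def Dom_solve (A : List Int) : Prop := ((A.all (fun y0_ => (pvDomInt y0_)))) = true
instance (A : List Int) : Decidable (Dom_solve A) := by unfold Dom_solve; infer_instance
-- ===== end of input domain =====

-- B replaces A's scan of all candidate divisors 2..i//2 by trial division up to sqrt(i),
-- adding each element's contribution in closed form (objective: faster).

-- ===== PORT A =====
-- inner loop of A: walk the range, stop at the first divisor, count the steps before it
def innerA (i : Int) : List Int → Int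
  | [] => 0
  | j :: rest => if PySem.Int.mod i j == 0 then 0 else 1 + innerA i rest

def solve (A : List Int) : Int :=
  A.foldl (fun count i =>
    if i == 2 then count + 1
    else if i > 2 then
      count + innerA i (PySem.List.pyRange 2 (PySem.Int.floordiv i 2 + 1) 1)
    else count) 0

-- ===== PORT B =====
-- termination fact for the trial-division loop
theorem pv_sq_le_imp_le (j n : Int) (h : j * j ≤ n) : j ≤ n := by nlinarith [sq_nonneg j, sq_nonneg (j - 1)]

-- smallest divisor of n in [j, sqrt n], by trial division (Source B's while loop)
def findDivB (n j : Int) : Option Int :=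
  if h : j * j ≤ n then
    if PySem.Int.mod n j == 0 then some j
    else findDivB n (j + 1)
  else none
termination_by (n + 1 - j).toNat
decreasing_by
  have := pv_sq_le_imp_le j n h
  omega

def solve_alt (A : List Int) : Int :=
  A.foldl (fun count i =>
    if i == 2 then count + 1
    else if i > 2 then
      match findDivB i 2 with
      | none => count + (PySem.Int.floordiv i 2 - 1)
      | some d => count + (d - 2)
    else count) 0

-- ===== PRECONDITION & SPEC =====
def Spec_solve (A : List Int) (out : Int) : Prop := out = solve_alt A
instance (A : List Int) (out : Int) : Decidable (Spec_solve A out) := by unfold Spec_solve; infer_instance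

-- ===== CLAIM (what is proved, stated in full; the proofs are below) =====
def Claim_equal_solve : Prop := ∀ (A : List Int), Dom_solve A → Spec_solve A (solve A)

-- ===== LEMMAS AND PROOFS =====

-- if nothing in [a,b) divides i, innerA counts the whole range
theorem innerA_all (i : Int) : ∀ (a b : Int),
    (∀ k, a ≤ k → k < b → PySem.Int.mod i k ≠ 0) →
    innerA i (PySem.List.pyRange a b 1) = max (b - a) 0 := by
  intro a b
  induction hn : (b - a).toNat generalizing a with
  | zero =>
    intro _
    rw [PySem.List.pyRange_one_eq_nil (by omega)]
    simp [innerA]; omega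
  | succ m ih =>
    intro hfree
    rw [PySem.List.pyRange_one_cons (by omega)]
    simp only [innerA]
    rw [if_neg (by simpa using hfree a le_rfl (by omega))]
    rw [ih (a + 1) (by omega) (fun k hk1 hk2 => hfree k (by omega) hk2)]
    omega

-- main per-element lemma, following findDivB's recursion
theorem main_lemma (i : Int) (hi : 2 < i) : ∀ (j : Int), 2 ≤ j →
    j ≤ PySem.Int.floordiv i 2 + 1 →
    (∀ k, 2 ≤ k → k < j → PySem.Int.mod i k ≠ 0) →
    innerA i (PySem.List.pyRange j (PySem.Int.floordiv i 2 + 1) 1) =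
      (match findDivB i j with
       | some d => d - j
       | none => PySem.Int.floordiv i 2 + 1 - j) := by
  have hfd : PySem.Int.floordiv i 2 = i / 2 := PySem.Int.floordiv_eq_ediv_of_pos (by omega)
  intro j
  induction hn : (i + 1 - j).toNat using Nat.strong_induction_on generalizing j with
  | _ m ih =>
  intro hj2 hjb hfree
  by_cases hsq : j * j ≤ i
  · -- loop body runs: j ≤ i/2, so the range is nonempty and starts with j
    have hji2 : j ≤ i / 2 := by
      have h2j : 2 * j ≤ i := by nlinarith
      omega
    by_cases hmod : PySem.Int.mod i j == 0
    · -- j divides i: A breaks immediately, B returns j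
      rw [findDivB, dif_pos hsq]
      rw [PySem.List.pyRange_one_cons (by omega)]
      simp [innerA, hmod]
    · -- j does not divide i: both step to j+1
      rw [findDivB, dif_pos hsq, if_neg hmod]
      rw [PySem.List.pyRange_one_cons (by omega)]
      simp only [innerA]
      rw [if_neg (by simpa using hmod)]
      have hle : j ≤ i := pv_sq_le_imp_le j i hsq
      rw [ih (i + 1 - (j + 1)).toNat (by omega) (j + 1) rfl (by omega) (by omega)
          (by
            intro k hk1 hk2
            by_cases hkj : k = j
            · subst hkj; simpa using hmod
            · exact hfree k hk1 (by omega))]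
      cases hfd2 : findDivB i (j + 1) with
      | none =>
        show 1 + (PySem.Int.floordiv i 2 + 1 - (j + 1)) = PySem.Int.floordiv i 2 + 1 - j
        omega
      | some d =>
        show 1 + (d - (j + 1)) = d - j
        omega
  · -- j*j > i: B stops with none; no divisor remains in [j, i/2], so A counts the full range
    rw [findDivB, dif_neg hsq]
    have hfree' : ∀ k, j ≤ k → k < PySem.Int.floordiv i 2 + 1 → PySem.Int.mod i k ≠ 0 := by
      intro k hk1 hk2 hdvd
      have hk0 : 0 < k := by omega
      have hkdvd : k ∣ i := (PySem.Int.mod_eq_zero_iff_dvd i k).mp hdvd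
      obtain ⟨m, hm⟩ := hkdvd
      have hki2 : k ≤ i / 2 := by omega
      have h2k : 2 * k ≤ i := by omega
      have hm2 : 2 ≤ m := by nlinarith
      have hmj : m < j := by nlinarith
      have hmdvd : PySem.Int.mod i m = 0 := by
        rw [PySem.Int.mod_eq_zero_iff_dvd i m]
        exact ⟨k, by rw [hm]; ring⟩
      exact hfree m hm2 hmj hmdvd
    rw [innerA_all i j _ hfree']
    simp; omega

-- the two fold steps agree on every element
theorem step_eq (count i : Int) :
    (if i == 2 then count + 1
     else if i > 2 then
       count + innerA i (PySem.List.pyRange 2 (PySem.Int.floordiv i 2 + 1) 1)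
     else count) =
    (if i == 2 then count + 1
     else if i > 2 then
       match findDivB i 2 with
       | none => count + (PySem.Int.floordiv i 2 - 1)
       | some d => count + (d - 2)
     else count) := by
  by_cases h2 : i == 2
  · simp [h2]
  · simp only [h2]
    by_cases hgt : i > 2
    · simp only [hgt, if_pos]
      have hfd : PySem.Int.floordiv i 2 = i / 2 := PySem.Int.floordiv_eq_ediv_of_pos (by omega)
      have h := main_lemma i hgt 2 le_rfl (by omega) (by intro k hk1 hk2; omega)
      rw [h]
      cases hfd2 : findDivB i 2 with
      | none =>
        show count + (PySem.Int.floordiv i 2 + 1 - 2) = count + (PySem.Int.floordiv i 2 - 1)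
        omega
      | some d =>
        show count + (d - 2) = count + (d - 2)
        rfl
    · simp [hgt]

-- ===== VERDICT (by name: the statement is the Claim_ definition above) =====
theorem solve_spec : Claim_equal_solve := by
  intro A _
  unfold Spec_solve solve solve_alt
  congr 1
  funext count i
  exact step_eq count i
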